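-- pv_equiv track=rewrite | github.com/novalym/velm | src/velm/gnosis/redemption.py | _find_variable_definition_zone
-- ===== SOURCE A (Python) =====
-- from typing import List, Dict, Any, Callable
--
-- def _find_variable_definition_zone(lines: List[str]) -> int:
--     """
--     [THE GNOSTIC LOCATOR - ASCENDED]
--     Finds the optimal location for a new variable: top of file or end of existing var block.
--     """
--     insertion_point = 0
--     for i, line in enumerate(lines):
--         stripped = line.strip()
--         if not stripped: continue  # Skip voids
--         if stripped.startswith('#'):
--             insertion_point = i + 1
--             continue
--         if stripped.startswith('$$'):
--             insertion_point = i + 1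
--             continue
--         break  # Stop at first non-var, non-comment line
--     return insertion_point
-- ===== SOURCE B (Python) =====
-- def _find_variable_definition_zone(lines):
--     # Two-phase: collect the leading block of blank/comment/$$ lines, then
--     # trim trailing blanks from it; the insertion index is the block's length.
--     prefix = []
--     for line in lines:
--         s = line.strip()
--         if not (s == '' or s.startswith('#') or s.startswith('$$')):
--             break
--         prefix.append(line)
--     while prefix and not prefix[-1].strip():
--         prefix.pop()
--     return len(prefix)
-- ===== Notes on version B (the rewrite author's own statement) =====
-- stated objective: alternative
-- what changed: Replaces the running insertion_point accumulator with a two-phase decomposition: take the leading prefix of blank/comment/$$ lines, trim its trailing blanks, and return the prefix length.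
import Mathlib
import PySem

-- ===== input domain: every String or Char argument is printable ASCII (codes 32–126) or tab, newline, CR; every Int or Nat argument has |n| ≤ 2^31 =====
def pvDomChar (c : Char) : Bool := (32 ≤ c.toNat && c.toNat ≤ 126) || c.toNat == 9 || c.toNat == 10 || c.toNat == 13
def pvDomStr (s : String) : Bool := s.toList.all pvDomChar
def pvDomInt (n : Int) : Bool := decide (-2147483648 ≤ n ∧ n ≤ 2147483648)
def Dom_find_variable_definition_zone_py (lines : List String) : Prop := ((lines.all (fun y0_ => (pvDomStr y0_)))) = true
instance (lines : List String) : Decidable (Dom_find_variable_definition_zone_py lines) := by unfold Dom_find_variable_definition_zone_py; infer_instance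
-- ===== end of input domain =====

-- B = A proved equivalent; B recomputes the same index by a two-phase prefix-then-trim decomposition.
-- ===== PORT A =====
-- the enumerate loop of A: i is the current index, acc the running insertion_point
def pvLoopA : List String → Int → Int → Int
  | [], _, acc => acc
  | l :: ls, i, acc =>
      let stripped := PySem.Str.strip l
      if stripped = "" then pvLoopA ls (i + 1) acc
      else if PySem.Str.startswith stripped "#" then pvLoopA ls (i + 1) (i + 1)
      else if PySem.Str.startswith stripped "$$" then pvLoopA ls (i + 1) (i + 1)
      else acc

def find_variable_definition_zone_py (lines : List String) : Int :=
  pvLoopA lines 0 0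

-- ===== PORT B =====
def pvBlank (l : String) : Bool := PySem.Str.strip l = ""

def pvPred (l : String) : Bool :=
  let s := PySem.Str.strip l
  s = "" || PySem.Str.startswith s "#" || PySem.Str.startswith s "$$"

def find_variable_definition_zone_py_alt (lines : List String) : Int :=
  let prefixB := lines.takeWhile pvPred
  -- the pop-while loop: drop trailing blank lines (= reverse, dropWhile blank, reverse)
  let trimmed := (prefixB.reverse.dropWhile pvBlank).reverse
  (trimmed.length : Int)

-- ===== PRECONDITION & SPEC =====
def Spec_find_variable_definition_zone_py (lines : List String) (out : Int) : Prop := out = find_variable_definition_zone_py_alt lines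
instance (lines : List String) (out : Int) : Decidable (Spec_find_variable_definition_zone_py lines out) := by unfold Spec_find_variable_definition_zone_py; infer_instance

-- ===== CLAIM (what is proved, stated in full; the proofs are below) =====
def Claim_equal_find_variable_definition_zone_py : Prop := ∀ (lines : List String), Dom_find_variable_definition_zone_py lines → Spec_find_variable_definition_zone_py lines (find_variable_definition_zone_py lines)

-- ===== LEMMAS AND PROOFS =====

-- ===== VERDICT (by name: the statement is the Claim_ definition above) =====
-- g: B's value on a suffix, as a Nat
def pvG (ls : List String) : Nat := ((ls.takeWhile pvPred).reverse.dropWhile pvBlank).length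

theorem pvG_cons_nonblank (l : String) (ls : List String)
    (hp : pvPred l = true) (hb : pvBlank l = false) :
    pvG (l :: ls) = pvG ls + 1 := by
  simp only [pvG, List.takeWhile_cons, hp, if_true, List.reverse_cons, List.dropWhile_append]
  split
  · rename_i h
    rw [List.isEmpty_iff] at h
    simp [h, List.dropWhile_cons, hb]
  · simp

theorem pvG_cons_blank (l : String) (ls : List String)
    (hp : pvPred l = true) (hb : pvBlank l = true) :
    pvG (l :: ls) = if pvG ls = 0 then 0 else pvG ls + 1 := by
  simp only [pvG, List.takeWhile_cons, hp, if_true, List.reverse_cons, List.dropWhile_append]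
  split
  · rename_i h
    rw [List.isEmpty_iff] at h
    simp [h, List.dropWhile_cons, hb]
  · rename_i h
    rw [Bool.not_eq_true, List.isEmpty_eq_false_iff] at h
    simp [List.length_eq_zero_iff, h]

theorem pvG_cons_stop (l : String) (ls : List String) (hp : pvPred l = false) :
    pvG (l :: ls) = 0 := by
  simp [pvG, List.takeWhile_cons, hp]

theorem pvLoopA_eq (ls : List String) : ∀ (i acc : Int),
    pvLoopA ls i acc = if pvG ls = 0 then acc else i + pvG ls := by
  induction ls with
  | nil => intro i acc; simp [pvLoopA, pvG]
  | cons l ls ih =>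
    intro i acc
    by_cases hb : PySem.Str.strip l = ""
    · have hp : pvPred l = true := by simp [pvPred, hb]
      have hb' : pvBlank l = true := by simp [pvBlank, hb]
      rw [pvLoopA, pvG_cons_blank l ls hp hb']
      simp only [hb, if_true, ih]
      by_cases h0 : pvG ls = 0 <;> simp [h0] <;> omega
    · by_cases h1 : PySem.Str.startswith (PySem.Str.strip l) "#" = true
      · have hp : pvPred l = true := by
          simp [PySem.Str.startswith] at h1; simp [pvPred, h1]
        have hb' : pvBlank l = false := by simp [pvBlank, hb]
        rw [pvLoopA, pvG_cons_nonblank l ls hp hb']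
        simp only [hb, if_false, h1, if_true, ih]
        by_cases h0 : pvG ls = 0 <;> simp [h0] <;> omega
      · by_cases h2 : PySem.Str.startswith (PySem.Str.strip l) "$$" = true
        · have hp : pvPred l = true := by
            simp [PySem.Str.startswith] at h2; simp [pvPred, h2]
          have hb' : pvBlank l = false := by simp [pvBlank, hb]
          rw [pvLoopA, pvG_cons_nonblank l ls hp hb']
          simp only [hb, if_false, h1, h2, if_true, ih]
          by_cases h0 : pvG ls = 0 <;> simp [h0] <;> omega
        · have hp : pvPred l = false := by
            simp [PySem.Str.startswith] at h1 h2; simp [pvPred, hb, h1, h2]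
          rw [pvLoopA, pvG_cons_stop l ls hp]
          simp [PySem.Str.startswith] at h1 h2
          simp [hb, h1, h2]

theorem find_variable_definition_zone_py_spec : Claim_equal_find_variable_definition_zone_py := by
  intro lines _
  unfold Spec_find_variable_definition_zone_py
  unfold find_variable_definition_zone_py find_variable_definition_zone_py_alt
  rw [pvLoopA_eq]
  have : ((((lines.takeWhile pvPred).reverse.dropWhile pvBlank).reverse).length) = pvG lines := by
    simp [pvG]
  by_cases h0 : pvG lines = 0 <;> simp [h0, this]
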